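-- pv_equiv track=rewrite | github.com/ruiqi-zhong/TestSuiteEval | fuzz/fuzz.py | filter_by_primary
-- ===== SOURCE A (Python) =====
-- from collections import OrderedDict
-- from typing import Dict, List, Tuple, Set, TypeVar
--
-- def filter_by_primary(column2elements: Dict[str, List], primary_keys: List[str])\
--         -> Dict[str, List]:
--     if len(primary_keys) == 0:
--         return column2elements
--     num_elements = len(column2elements[primary_keys[0]])
--     filtered_idx, existing_keys = set(), set()
--     for idx in range(num_elements):
--         key = tuple([column2elements[k][idx] for k in primary_keys])
--         if key in existing_keys:
--             filtered_idx.add(idx)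
--             continue
--         existing_keys.add(key)
--
--     filtered_column2elements = OrderedDict()
--     for column_name, elements in column2elements.items():
--         filtered_column2elements[column_name] = [elements[idx] for idx in range(num_elements) if idx not in filtered_idx]
--     return filtered_column2elements
-- ===== SOURCE B (Python) =====
-- from collections import OrderedDict
--
--
-- def filter_by_primary(column2elements, primary_keys):
--     if len(primary_keys) == 0:
--         return column2elements
--     num_elements = len(column2elements[primary_keys[0]])
--     cols = list(column2elements.items())
--     outs = [[] for _ in cols]
--     seen = set()
--     for idx in range(num_elements):
--         key = tuple(column2elements[k][idx] for k in primary_keys)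
--         if key in seen:
--             continue
--         seen.add(key)
--         for out, (_, elements) in zip(outs, cols):
--             out.append(elements[idx])
--     return OrderedDict((name, out) for (name, _), out in zip(cols, outs))
-- ===== Notes on version B (the rewrite author's own statement) =====
-- stated objective: alternative
-- what changed: B replaces A's two-stage scheme (a dedup pass collecting a set of removed row indices, then per-column rebuild loops testing membership for every index) with a single row-wise pass over parallel output lists that appends each surviving row's field of every column directly, so no kept/removed index bookkeeping exists at all and the column/row loop nesting is inverted.
-- outside the precondition, e.g. on filter_by_primary({'a': [1, 1], 'b': [5]}, ['a']): A returns {'a': [1], 'b': [5]}, B returns {'a': [1], 'b': [5]}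
import Mathlib
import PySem

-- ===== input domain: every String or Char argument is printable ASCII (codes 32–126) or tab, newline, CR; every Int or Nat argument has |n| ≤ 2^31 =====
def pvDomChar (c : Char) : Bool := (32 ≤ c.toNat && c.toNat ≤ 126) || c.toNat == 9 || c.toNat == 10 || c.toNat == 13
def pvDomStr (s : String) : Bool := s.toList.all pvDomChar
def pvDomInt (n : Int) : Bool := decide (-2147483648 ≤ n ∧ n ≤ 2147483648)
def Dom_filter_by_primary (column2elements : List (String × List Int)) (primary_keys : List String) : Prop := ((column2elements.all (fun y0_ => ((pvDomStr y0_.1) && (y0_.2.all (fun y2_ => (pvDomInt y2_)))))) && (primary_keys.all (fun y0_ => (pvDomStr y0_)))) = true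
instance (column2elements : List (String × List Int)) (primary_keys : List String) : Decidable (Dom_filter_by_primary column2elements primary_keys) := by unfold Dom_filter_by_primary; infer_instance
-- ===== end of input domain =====

-- B restructures A: instead of A's two stages (a pass collecting the set of removed row indices,
-- then per-column rebuilds that test membership per index), B builds all output columns in ONE
-- row-wise pass over parallel lists, appending each surviving row's fields directly — no index
-- set, no kept/removed index bookkeeping at all. Same cost; objective: alternative.

-- key = tuple([column2elements[k][idx] for k in primary_keys]) — same expression in both Pythons.
-- Exact under Pre_ (every k is a present key, every column has ≥ num_elements entries).
def pvKey (column2elements : List (String × List Int)) (primary_keys : List String) (idx : Int) : List Int :=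
  primary_keys.map (fun k => PySem.List.pyGetD ((List.lookup k column2elements).getD []) idx 0)

-- ===== PORT A =====
-- A's first loop body: dedup by key, collecting the SET of removed indices (filtered_idx, existing_keys).
def pvStepA (keyf : Int → List Int) (st : PySem.Set Int × PySem.Set (List Int)) (idx : Int) :
    PySem.Set Int × PySem.Set (List Int) :=
  if PySem.Set.contains st.2 (keyf idx) then (PySem.Set.add st.1 idx, st.2)
  else (st.1, PySem.Set.add st.2 (keyf idx))

def filter_by_primary (column2elements : List (String × List Int)) (primary_keys : List String) : List (String × List Int) :=
  match primary_keys with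
  | [] => column2elements
  | k0 :: _ =>
    -- KeyError (missing key) / IndexError (short column) are excluded by Pre_; the getD defaults are never used there.
    let n : Int := ((List.lookup k0 column2elements).getD []).length
    let st := (PySem.List.pyRange 0 n 1).foldl
      (pvStepA (pvKey column2elements primary_keys)) (PySem.Set.empty, PySem.Set.empty)
    column2elements.map (fun ce =>
      (ce.1, (PySem.List.pyRange 0 n 1).foldl
        (fun acc idx => if PySem.Set.contains st.1 idx then acc
                        else acc ++ [PySem.List.pyGetD ce.2 idx 0]) []))

-- ===== PORT B =====
-- B's loop body over (seen, outs): on a fresh key append this row's field of every column to the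
-- matching output list (Python: for out, (_, elements) in zip(outs, cols): out.append(elements[idx])).
def pvStepB (keyf : Int → List Int) (c2e : List (String × List Int))
    (st : PySem.Set (List Int) × List (List Int)) (idx : Int) :
    PySem.Set (List Int) × List (List Int) :=
  if PySem.Set.contains st.1 (keyf idx) then st
  else (PySem.Set.add st.1 (keyf idx),
        (st.2.zip c2e).map (fun p => p.1 ++ [PySem.List.pyGetD p.2.2 idx 0]))

def filter_by_primary_alt (column2elements : List (String × List Int)) (primary_keys : List String) : List (String × List Int) :=
  match primary_keys with
  | [] => column2elements
  | k0 :: rest =>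
    let n : Int := ((List.lookup k0 column2elements).getD []).length
    let st := (PySem.List.pyRange 0 n 1).foldl
      (pvStepB (pvKey column2elements (k0 :: rest)) column2elements)
      (PySem.Set.empty, column2elements.map (fun _ => []))
    (column2elements.zip st.2).map (fun p => (p.1.1, p.2))

-- ===== PRECONDITION & SPEC =====
-- Pre_ excludes (a) association lists with duplicate column names, which do not represent a Python
-- dict (the dict collapses them), and (b) inputs where A raises KeyError (a primary key absent from
-- the dict) or may raise IndexError (a column shorter than the first primary-key column); the
-- length bound is slightly wider than A's raising set: on a ragged dict whose surviving row indices
-- all happen to fit the short column A still returns (see cites), and B returns the same value.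
def Pre_filter_by_primary (column2elements : List (String × List Int)) (primary_keys : List String) : Prop :=
  (column2elements.map Prod.fst).Nodup ∧
  (primary_keys ≠ [] →
    (∀ k ∈ primary_keys, k ∈ column2elements.map Prod.fst) ∧
    (∀ ce ∈ column2elements,
      ((List.lookup (primary_keys.headD "") column2elements).getD []).length ≤ ce.2.length))
instance (column2elements : List (String × List Int)) (primary_keys : List String) : Decidable (Pre_filter_by_primary column2elements primary_keys) := by unfold Pre_filter_by_primary; infer_instance

def pvWitness_filter_by_primary : (List (String × List Int)) × List String :=
  ([("a", [1, 1, 2]), ("b", [5, 6, 7])], ["a"])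

def Spec_filter_by_primary (column2elements : List (String × List Int)) (primary_keys : List String) (out : List (String × List Int)) : Prop := out = filter_by_primary_alt column2elements primary_keys
instance (column2elements : List (String × List Int)) (primary_keys : List String) (out : List (String × List Int)) : Decidable (Spec_filter_by_primary column2elements primary_keys out) := by unfold Spec_filter_by_primary; infer_instance

-- ===== CLAIM (what is proved, stated in full; the proofs are below) =====
def Claim_equal_filter_by_primary : Prop := ∀ (column2elements : List (String × List Int)) (primary_keys : List String), Dom_filter_by_primary column2elements primary_keys → Pre_filter_by_primary column2elements primary_keys → Spec_filter_by_primary column2elements primary_keys (filter_by_primary column2elements primary_keys)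

-- ===== LEMMAS AND PROOFS =====

-- proof-only reference loop: dedup collecting the ordered list of kept indices
def pvStepK (keyf : Int → List Int) (sk : PySem.Set (List Int) × List Int) (idx : Int) :
    PySem.Set (List Int) × List Int :=
  if PySem.Set.contains sk.1 (keyf idx) then sk
  else (PySem.Set.add sk.1 (keyf idx), sk.2 ++ [idx])

-- an index not occurring in the remaining range is in A's final filtered set iff it already was
lemma pv_memF_fold (keyf : Int → List Int) :
    ∀ (R : List Int) (st : PySem.Set Int × PySem.Set (List Int)) (i : Int), i ∉ R →
      (i ∈ (R.foldl (pvStepA keyf) st).1 ↔ i ∈ st.1) := by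
  intro R
  induction R with
  | nil => intro st i _; simp
  | cons a R ih =>
    intro st i hi
    have hia : i ≠ a := fun h => hi (h ▸ List.mem_cons_self)
    have hiR : i ∉ R := fun h => hi (List.mem_cons_of_mem _ h)
    simp only [List.foldl_cons]
    rw [ih _ i hiR]
    unfold pvStepA
    split
    · simp [PySem.Set.mem_add, hia]
    · simp

-- joint invariant: A's existing_keys = K-loop's seen, and the kept list is the range filtered by A's final filtered_idx
lemma pv_loops_rel (keyf : Int → List Int) :
    ∀ (R : List Int), R.Nodup →
      ∀ (F : PySem.Set Int) (E : PySem.Set (List Int)) (K : List Int),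
        (∀ i ∈ R, i ∉ F) →
        (R.foldl (pvStepA keyf) (F, E)).2 = (R.foldl (pvStepK keyf) (E, K)).1 ∧
        (R.foldl (pvStepK keyf) (E, K)).2 =
          K ++ R.filter (fun i => !(PySem.Set.contains (R.foldl (pvStepA keyf) (F, E)).1 i)) := by
  intro R
  induction R with
  | nil => intro _ F E K _; simp
  | cons a R ih =>
    intro hnd F E K hF
    have haR : a ∉ R := (List.nodup_cons.mp hnd).1
    have hndR : R.Nodup := (List.nodup_cons.mp hnd).2
    simp only [List.foldl_cons]
    by_cases h : keyf a ∈ E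
    · -- duplicate row: A adds a to filtered_idx, the K-loop skips
      have hstep : pvStepA keyf (F, E) a = (PySem.Set.add F a, E) := by
        unfold pvStepA; simp [h]
      have hstepK : pvStepK keyf (E, K) a = (E, K) := by
        unfold pvStepK; simp [h]
      rw [hstep, hstepK]
      have hF' : ∀ i ∈ R, i ∉ PySem.Set.add F a := by
        intro i hi
        have : i ≠ a := fun he => haR (he ▸ hi)
        simp [PySem.Set.mem_add, hF i (List.mem_cons_of_mem _ hi), this]
      obtain ⟨h1, h2⟩ := ih hndR (PySem.Set.add F a) E K hF'
      refine ⟨h1, ?_⟩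
      have haFin : a ∈ (R.foldl (pvStepA keyf) (PySem.Set.add F a, E)).1 := by
        rw [pv_memF_fold keyf R _ a haR]
        simp [PySem.Set.mem_add]
      rw [h2, List.filter_cons]
      simp [haFin]
    · -- fresh row: A records the key, the K-loop records the key and keeps the index
      have hstep : pvStepA keyf (F, E) a = (F, PySem.Set.add E (keyf a)) := by
        unfold pvStepA; simp [h]
      have hstepK : pvStepK keyf (E, K) a = (PySem.Set.add E (keyf a), K ++ [a]) := by
        unfold pvStepK; simp [h]
      rw [hstep, hstepK]
      have hF' : ∀ i ∈ R, i ∉ F := fun i hi => hF i (List.mem_cons_of_mem _ hi)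
      obtain ⟨h1, h2⟩ := ih hndR F (PySem.Set.add E (keyf a)) (K ++ [a]) hF'
      refine ⟨h1, ?_⟩
      have haFin : a ∉ (R.foldl (pvStepA keyf) (F, PySem.Set.add E (keyf a))).1 := by
        rw [pv_memF_fold keyf R _ a haR]
        exact hF a List.mem_cons_self
      rw [h2, List.filter_cons]
      simp [haFin]

-- A's conditional-append rebuild of a column is the selection map over the filtered range
lemma pv_rebuild (F : PySem.Set Int) (R : List Int) (elems : List Int) :
    R.foldl (fun acc idx => if PySem.Set.contains F idx then acc
                            else acc ++ [PySem.List.pyGetD elems idx 0]) [] =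
      (R.filter (fun i => !(PySem.Set.contains F i))).map (fun i => PySem.List.pyGetD elems i 0) := by
  have hfun : (fun (acc : List Int) idx => if PySem.Set.contains F idx then acc
                  else acc ++ [PySem.List.pyGetD elems idx 0]) =
      (fun acc idx => if (!(PySem.Set.contains F idx)) = true
                  then acc ++ [PySem.List.pyGetD elems idx 0] else acc) := by
    funext acc idx
    cases h : PySem.Set.contains F idx
    · simp
    · simp
  rw [hfun, PySem.List.foldl_append_if]
  simp

-- B's row-wise fold over parallel output lists computes, per column, the selection over the kept list
lemma pv_foldB_eq (keyf : Int → List Int) (c2e : List (String × List Int)) :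
    ∀ (R : List Int) (E : PySem.Set (List Int)) (K : List Int),
      R.foldl (pvStepB keyf c2e)
        (E, c2e.map (fun ce => K.map (fun i => PySem.List.pyGetD ce.2 i 0))) =
      ((R.foldl (pvStepK keyf) (E, K)).1,
       c2e.map (fun ce => (R.foldl (pvStepK keyf) (E, K)).2.map (fun i => PySem.List.pyGetD ce.2 i 0))) := by
  intro R
  induction R with
  | nil => intro E K; simp
  | cons a R ih =>
    intro E K
    simp only [List.foldl_cons]
    by_cases h : keyf a ∈ E
    · have hB : pvStepB keyf c2e
          (E, c2e.map (fun ce => K.map (fun i => PySem.List.pyGetD ce.2 i 0))) a =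
          (E, c2e.map (fun ce => K.map (fun i => PySem.List.pyGetD ce.2 i 0))) := by
        unfold pvStepB; simp [h]
      have hK : pvStepK keyf (E, K) a = (E, K) := by
        unfold pvStepK; simp [h]
      rw [hB, hK, ih]
    · have hB : pvStepB keyf c2e
          (E, c2e.map (fun ce => K.map (fun i => PySem.List.pyGetD ce.2 i 0))) a =
          (PySem.Set.add E (keyf a),
           c2e.map (fun ce => (K ++ [a]).map (fun i => PySem.List.pyGetD ce.2 i 0))) := by
        unfold pvStepB
        rw [← List.map_prod_right_eq_zip]
        simp [h, List.map_map, Function.comp_def]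
      have hK : pvStepK keyf (E, K) a = (PySem.Set.add E (keyf a), K ++ [a]) := by
        unfold pvStepK; simp [h]
      rw [hB, hK, ih]

-- ===== VERDICT (by name: the statement is the Claim_ definition above) =====
theorem filter_by_primary_spec : Claim_equal_filter_by_primary := by
  intro c2e pks _ _
  unfold Spec_filter_by_primary
  cases pks with
  | nil => rfl
  | cons k0 rest =>
    simp only [filter_by_primary, filter_by_primary_alt]
    set keyf := pvKey c2e (k0 :: rest) with hkeyf
    set R := PySem.List.pyRange 0 ((((List.lookup k0 c2e).getD []).length : Nat) : Int) 1 with hR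
    have hfresh : ∀ i ∈ R, i ∉ (PySem.Set.empty : PySem.Set Int) := by
      intro i _ hi; simp [PySem.Set.empty] at hi

    obtain ⟨_, h2⟩ := pv_loops_rel keyf R (PySem.List.nodup_pyRange_one 0 _)
      PySem.Set.empty PySem.Set.empty [] hfresh
    have hB0 : (c2e.map (fun _ => ([] : List Int))) =
        c2e.map (fun ce => ([] : List Int).map (fun i => PySem.List.pyGetD ce.2 i 0)) := by
      simp
    rw [hB0, pv_foldB_eq keyf c2e R PySem.Set.empty []]
    rw [← List.map_prod_left_eq_zip]
    rw [List.map_map]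
    apply List.map_congr_left
    intro ce _
    simp only [Function.comp]
    rw [pv_rebuild, h2]
    simp
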